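-- pv_equiv track=rewrite | github.com/tripavail92-byte/ifxmt5ai | runtime/news_calendar.py | _resolve_currencies
-- ===== SOURCE A (Python) =====
-- SYMBOL_CURRENCIES: dict[str, tuple[str, ...]] = {
--     "EURUSD": ("EUR", "USD"),
--     "GBPUSD": ("GBP", "USD"),
--     "USDJPY": ("USD", "JPY"),
--     "AUDUSD": ("AUD", "USD"),
--     "NZDUSD": ("NZD", "USD"),
--     "USDCAD": ("USD", "CAD"),
--     "USDCHF": ("USD", "CHF"),
--     "EURJPY": ("EUR", "JPY"),
--     "GBPJPY": ("GBP", "JPY"),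
--     "EURGBP": ("EUR", "GBP"),
--     "EURAUD": ("EUR", "AUD"),
--     "GBPAUD": ("GBP", "AUD"),
--     "AUDCAD": ("AUD", "CAD"),
--     "AUDNZD": ("AUD", "NZD"),
--     "NZDCAD": ("NZD", "CAD"),
--     "USDNOK": ("USD", "NOK"),
--     "USDSEK": ("USD", "SEK"),
--     "XAUUSD": ("USD",),
--     "XAGUSD": ("USD",),
--     "US30":   ("USD",),
--     "US500":  ("USD",),
--     "NAS100": ("USD",),
--     "GER40":  ("EUR",),
--     "UK100":  ("GBP",),
-- }
--
-- def _resolve_currencies(symbol: str) -> list[str] | None: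
--     """
--     Return the list of currencies relevant for a given symbol string.
--     Handles broker suffix variants (EURUSDm, EURUSD.raw, etc.).
--     Returns None if symbol not recognized (no currency filter applied).
--     """
--     sym_upper = symbol.upper()
--     for key, currencies in SYMBOL_CURRENCIES.items():
--         if sym_upper == key or sym_upper.startswith(key):
--             return list(currencies)
--     # Try raw 6-char trim (e.g. "EURUSDm" → "EURUSD")
--     stripped = sym_upper[:6]
--     if stripped in SYMBOL_CURRENCIES:
--         return list(SYMBOL_CURRENCIES[stripped])
--     return None
-- ===== SOURCE B (Python) =====
-- # B: instead of one flat key->tuple table scanned linearly, classify the symbol: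
-- # FX pair keys (value derived by splitting the 6-char prefix), metal keys
-- # (value always ["USD"]), and index keys looked up by prefix at the key
-- # lengths in use (6, 5, 4).  Sound because no key is a prefix of another.
-- _PAIRS = frozenset((
--     "EURUSD", "GBPUSD", "USDJPY", "AUDUSD", "NZDUSD", "USDCAD", "USDCHF",
--     "EURJPY", "GBPJPY", "EURGBP", "EURAUD", "GBPAUD", "AUDCAD", "AUDNZD",
--     "NZDCAD", "USDNOK", "USDSEK",
-- ))
-- _METALS = frozenset(("XAUUSD", "XAGUSD"))
-- _INDEX = {"US30": "USD", "US500": "USD", "NAS100": "USD", "GER40": "EUR", "UK100": "GBP"}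
--
-- def _resolve_currencies(symbol: str) -> list[str] | None:
--     s = symbol.upper()
--     p = s[:6]
--     if p in _PAIRS:
--         return [p[:3], p[3:6]]
--     if p in _METALS:
--         return ["USD"]
--     for n in (6, 5, 4):
--         ccy = _INDEX.get(s[:n])
--         if ccy is not None:
--             return [ccy]
--     return None
-- ===== Notes on version B (the rewrite author's own statement) =====
-- stated objective: alternative
-- what changed: A scans the flat 24-entry key->tuple table with an equality/startswith test per key plus a trailing 6-char-trim fallback; B classifies the symbol instead: a set of 17 FX pair keys whose value is computed by splitting the 6-char prefix, a metal set returning ["USD"], and a 5-entry index dict probed directly at the candidate prefix lengths 6, 5, 4 - correct because no key is a prefix of another.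
import Mathlib
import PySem

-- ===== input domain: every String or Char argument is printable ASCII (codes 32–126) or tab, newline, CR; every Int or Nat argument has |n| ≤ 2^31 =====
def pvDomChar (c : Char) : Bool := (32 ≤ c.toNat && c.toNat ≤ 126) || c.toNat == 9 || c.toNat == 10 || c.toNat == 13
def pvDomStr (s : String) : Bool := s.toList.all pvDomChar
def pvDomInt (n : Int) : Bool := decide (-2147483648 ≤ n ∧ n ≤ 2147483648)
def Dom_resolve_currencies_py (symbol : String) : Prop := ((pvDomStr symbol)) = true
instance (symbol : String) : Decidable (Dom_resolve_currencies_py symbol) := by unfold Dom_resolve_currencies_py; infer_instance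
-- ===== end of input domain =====

-- B replaces A's flat-table startswith scan by a classification of the symbol:
-- FX pair keys (value split off the 6-char prefix), metal keys (always ["USD"]),
-- and a small index dict probed at the candidate prefix lengths 6, 5, 4.

-- ===== PORT A =====
-- A's module constant SYMBOL_CURRENCIES (keys on the List Char side; values as
-- the `list(currencies)` A returns).
def pvTable : List (List Char × List String) :=
  [ ("EURUSD".toList, ["EUR", "USD"]),
    ("GBPUSD".toList, ["GBP", "USD"]),
    ("USDJPY".toList, ["USD", "JPY"]),
    ("AUDUSD".toList, ["AUD", "USD"]),
    ("NZDUSD".toList, ["NZD", "USD"]),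
    ("USDCAD".toList, ["USD", "CAD"]),
    ("USDCHF".toList, ["USD", "CHF"]),
    ("EURJPY".toList, ["EUR", "JPY"]),
    ("GBPJPY".toList, ["GBP", "JPY"]),
    ("EURGBP".toList, ["EUR", "GBP"]),
    ("EURAUD".toList, ["EUR", "AUD"]),
    ("GBPAUD".toList, ["GBP", "AUD"]),
    ("AUDCAD".toList, ["AUD", "CAD"]),
    ("AUDNZD".toList, ["AUD", "NZD"]),
    ("NZDCAD".toList, ["NZD", "CAD"]),
    ("USDNOK".toList, ["USD", "NOK"]),
    ("USDSEK".toList, ["USD", "SEK"]),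
    ("XAUUSD".toList, ["USD"]),
    ("XAGUSD".toList, ["USD"]),
    ("US30".toList,   ["USD"]),
    ("US500".toList,  ["USD"]),
    ("NAS100".toList, ["USD"]),
    ("GER40".toList,  ["EUR"]),
    ("UK100".toList,  ["GBP"]) ]

-- A's `for key, currencies in SYMBOL_CURRENCIES.items(): if sym_upper == key or
-- sym_upper.startswith(key): return list(currencies)` as structural recursion.
def pvScanA (s : List Char) : List (List Char × List String) → Option (List String)
  | [] => none
  | (key, currencies) :: rest =>
      if s = key ∨ PySem.Chars.startswith s key = true then some currencies
      else pvScanA s rest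

def resolve_currencies_py (symbol : String) : Option (List String) :=
  let symUpper := PySem.Chars.upper symbol.toList
  match pvScanA symUpper pvTable with
  | some cs => some cs
  | none =>
      -- stripped = sym_upper[:6]; `stripped in SYMBOL_CURRENCIES` + the lookup,
      -- fused into one get? (some ↔ the Python `in` test succeeds).
      let stripped := PySem.List.slice symUpper none (some 6)
      match (PySem.Dict.mk pvTable).get? stripped with
      | some cs => some cs
      | none => none

-- ===== PORT B =====
-- B's module constants _PAIRS, _METALS, _INDEX.
def pvPairs : List (List Char) :=
  [ "EURUSD".toList, "GBPUSD".toList, "USDJPY".toList, "AUDUSD".toList,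
    "NZDUSD".toList, "USDCAD".toList, "USDCHF".toList, "EURJPY".toList,
    "GBPJPY".toList, "EURGBP".toList, "EURAUD".toList, "GBPAUD".toList,
    "AUDCAD".toList, "AUDNZD".toList, "NZDCAD".toList, "USDNOK".toList,
    "USDSEK".toList ]

def pvMetals : List (List Char) := [ "XAUUSD".toList, "XAGUSD".toList ]

def pvIndex : List (List Char × String) :=
  [ ("US30".toList, "USD"), ("US500".toList, "USD"), ("NAS100".toList, "USD"),
    ("GER40".toList, "EUR"), ("UK100".toList, "GBP") ]

-- B's `for n in (6, 5, 4): ccy = _INDEX.get(s[:n]); if ccy is not None: return [ccy]`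
def pvTryIdx (s : List Char) : List Int → Option (List String)
  | [] => none
  | n :: rest =>
      match (PySem.Dict.mk pvIndex).get? (PySem.List.slice s none (some n)) with
      | some ccy => some [ccy]
      | none => pvTryIdx s rest

def resolve_currencies_py_alt (symbol : String) : Option (List String) :=
  let s := PySem.Chars.upper symbol.toList
  let p := PySem.List.slice s none (some 6)
  if p ∈ pvPairs then
    some [String.ofList (PySem.List.slice p none (some 3)),
          String.ofList (PySem.List.slice p (some 3) (some 6))]
  else if p ∈ pvMetals then
    some ["USD"]
  else
    pvTryIdx s [6, 5, 4]

-- ===== PRECONDITION & SPEC =====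
def Spec_resolve_currencies_py (symbol : String) (out : Option (List String)) : Prop := out = resolve_currencies_py_alt symbol
instance (symbol : String) (out : Option (List String)) : Decidable (Spec_resolve_currencies_py symbol out) := by unfold Spec_resolve_currencies_py; infer_instance

-- ===== CLAIM (what is proved, stated in full; the proofs are below) =====
def Claim_equal_resolve_currencies_py : Prop := ∀ (symbol : String), Dom_resolve_currencies_py symbol → Spec_resolve_currencies_py symbol (resolve_currencies_py symbol)

-- ===== LEMMAS AND PROOFS =====

-- The table's keys are prefix-free: no key is a prefix of another unless equal.
theorem pvTable_prefixFree :
    ∀ p1 ∈ pvTable, ∀ p2 ∈ pvTable, p1.1 <+: p2.1 → p1.1 = p2.1 := by decide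

theorem pvTable_keys_nodup : (pvTable.map Prod.fst).Nodup := by decide

theorem pvIndex_keys_nodup : (pvIndex.map Prod.fst).Nodup := by decide

-- B's classification covers A's table, with the right values.
theorem pv_pairs_sub : ∀ k ∈ pvPairs, (k, [String.ofList (PySem.List.slice k none (some 3)), String.ofList (PySem.List.slice k (some 3) (some 6))]) ∈ pvTable := by decide

theorem pv_pairs_len : ∀ k ∈ pvPairs, k.length = 6 := by decide

theorem pv_metals_sub : ∀ k ∈ pvMetals, (k, ["USD"]) ∈ pvTable := by decide

theorem pv_metals_len : ∀ k ∈ pvMetals, k.length = 6 := by decide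

theorem pv_index_sub : ∀ q ∈ pvIndex, (q.1, [q.2]) ∈ pvTable := by decide

theorem pv_index_len : ∀ q ∈ pvIndex, q.1.length = 4 ∨ q.1.length = 5 ∨ q.1.length = 6 := by decide

theorem pv_table_classified :
    ∀ p ∈ pvTable, p.1 ∈ pvPairs ∨ p.1 ∈ pvMetals ∨ p.1 ∈ pvIndex.map Prod.fst := by decide

-- a successful table-dict lookup comes from a table entry
theorem pv_get?_mem {x : List Char} {v : List String}
    (h : (PySem.Dict.mk pvTable).get? x = some v) : (x, v) ∈ pvTable := by
  have := PySem.Dict.mem_items_of_get?_eq_some (PySem.Dict.mk pvTable) h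
  simpa [PySem.Dict.mk] using this

theorem pv_get?_of_mem {x : List Char} {v : List String}
    (h : (x, v) ∈ pvTable) : (PySem.Dict.mk pvTable).get? x = some v := by
  apply PySem.Dict.get?_of_mem_items (PySem.Dict.mk pvTable) (by simpa [PySem.Dict.mk] using h)
  simpa [PySem.Dict.keys, PySem.Dict.mk] using pvTable_keys_nodup

-- the same two facts for B's index dict
theorem pv_idx_get?_mem {x : List Char} {c : String}
    (h : (PySem.Dict.mk pvIndex).get? x = some c) : (x, c) ∈ pvIndex := by
  have := PySem.Dict.mem_items_of_get?_eq_some (PySem.Dict.mk pvIndex) h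
  simpa [PySem.Dict.mk] using this

theorem pv_idx_get?_of_mem {x : List Char} {c : String}
    (h : (x, c) ∈ pvIndex) : (PySem.Dict.mk pvIndex).get? x = some c := by
  apply PySem.Dict.get?_of_mem_items (PySem.Dict.mk pvIndex) (by simpa [PySem.Dict.mk] using h)
  simpa [PySem.Dict.keys, PySem.Dict.mk] using pvIndex_keys_nodup

-- A's loop guard, for a table entry, is exactly "the key is a prefix of s"
theorem pv_guard_iff (s key : List Char) :
    (s = key ∨ PySem.Chars.startswith s key = true) ↔ key <+: s := by
  constructor
  · rintro (rfl | h)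
    · exact List.prefix_refl _
    · exact (PySem.Chars.startswith_iff s key).mp h
  · intro h
    exact Or.inr ((PySem.Chars.startswith_iff s key).mpr h)

-- two table entries whose keys are both prefixes of s are equal
theorem pv_unique {s : List Char} {p1 p2 : List Char × List String}
    (h1 : p1 ∈ pvTable) (h2 : p2 ∈ pvTable)
    (hp1 : p1.1 <+: s) (hp2 : p2.1 <+: s) : p1 = p2 := by
  have hk : p1.1 = p2.1 := by
    rcases List.prefix_or_prefix_of_prefix hp1 hp2 with h | h
    · exact pvTable_prefixFree p1 h1 p2 h2 h
    · exact (pvTable_prefixFree p2 h2 p1 h1 h).symm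
  have : p1.2 = p2.2 := by
    have g1 := pv_get?_of_mem (x := p1.1) (v := p1.2) h1
    have g2 := pv_get?_of_mem (x := p2.1) (v := p2.2) h2
    rw [hk] at g1
    rw [g2] at g1
    exact (Option.some.injEq _ _).mp g1 |>.symm
  exact Prod.ext hk this

theorem pv_slice_take (s : List Char) (n : Int) (hn : 0 ≤ n) :
    PySem.List.slice s none (some n) = s.take n.toNat :=
  PySem.List.slice_to s hn

-- if A's scan over a sublist of the table misses, no entry of that sublist matches
theorem pvScanA_eq_none_iff (s : List Char) (l : List (List Char × List String)) :
    pvScanA s l = none ↔ ∀ p ∈ l, ¬ p.1 <+: s := by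
  induction l with
  | nil => simp [pvScanA]
  | cons hd tl ih =>
      by_cases h : hd.1 <+: s
      · simp only [pvScanA]
        rw [if_pos ((pv_guard_iff s hd.1).mpr h)]
        simp [h]
      · simp only [pvScanA]
        rw [if_neg (fun hc => h ((pv_guard_iff s hd.1).mp hc))]
        simp [ih, h]

-- if A's scan hits, it returns the value of a table entry whose key is a prefix of s
theorem pvScanA_eq_some (s : List Char) (l : List (List Char × List String))
    {v : List String} (h : pvScanA s l = some v) :
    ∃ p ∈ l, p.1 <+: s ∧ p.2 = v := by
  induction l with
  | nil => simp [pvScanA] at h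
  | cons hd tl ih =>
      by_cases hg : hd.1 <+: s
      · simp only [pvScanA] at h
        rw [if_pos ((pv_guard_iff s hd.1).mpr hg)] at h
        exact ⟨hd, by simp, hg, (Option.some.injEq _ _).mp h⟩
      · simp only [pvScanA] at h
        rw [if_neg (fun hc => hg ((pv_guard_iff s hd.1).mp hc))] at h
        obtain ⟨p, hp, hpre, hv⟩ := ih h
        exact ⟨p, by simp [hp], hpre, hv⟩

-- a key of length ≤ 6 that is a prefix of s is determined by s.take of its length,
-- and conversely s.take n ∈ … gives a table entry prefix of s.

-- a hit of B's index lookup at s.take n gives a table entry whose key is a prefix of s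
theorem pv_idx_hit {s : List Char} {n : Int} {c : String}
    (h : (PySem.Dict.mk pvIndex).get? (PySem.List.slice s none (some n)) = some c)
    (hn : 0 ≤ n) :
    ∃ p ∈ pvTable, p.1 <+: s ∧ p.2 = [c] := by
  rw [pv_slice_take s n hn] at h
  exact ⟨(s.take n.toNat, [c]), pv_index_sub _ (pv_idx_get?_mem h), List.take_prefix _ _, rfl⟩

-- the matched index entry: if (k,c) ∈ pvIndex and k <+: s then the lookup at |k| hits
theorem pv_idx_at_length {s : List Char} {q : List Char × String}
    (hq : q ∈ pvIndex) (hpre : q.1 <+: s) :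
    (PySem.Dict.mk pvIndex).get? (PySem.List.slice s none (some (q.1.length : Int)))
      = some q.2 := by
  rw [pv_slice_take s _ (by positivity)]
  have : s.take ((q.1.length : Int)).toNat = q.1 := by
    rw [Int.toNat_natCast]
    exact (List.prefix_iff_eq_take.mp hpre).symm
  rw [this]
  exact pv_idx_get?_of_mem hq

-- a 6-char key of pvPairs / pvMetals that equals s.take 6 is a table key prefix of s
theorem pv_take6_pairs_table {s : List Char} (h : s.take 6 ∈ pvPairs) :
    ∃ p ∈ pvTable, p.1 = s.take 6 ∧ p.1 <+: s := by
  exact ⟨(s.take 6, _), pv_pairs_sub _ h, rfl, List.take_prefix _ _⟩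

theorem pv_take6_metals_table {s : List Char} (h : s.take 6 ∈ pvMetals) :
    ∃ p ∈ pvTable, p.1 = s.take 6 ∧ p.1 <+: s := by
  exact ⟨(s.take 6, ["USD"]), pv_metals_sub _ h, rfl, List.take_prefix _ _⟩

-- pair entries of the table carry the split value
theorem pv_pairs_value : ∀ p ∈ pvTable, p.1 ∈ pvPairs →
    p.2 = [String.ofList (PySem.List.slice p.1 none (some 3)), String.ofList (PySem.List.slice p.1 (some 3) (some 6))] := by decide

-- metal entries of the table carry ["USD"]
theorem pv_metals_value : ∀ p ∈ pvTable, p.1 ∈ pvMetals → p.2 = ["USD"] := by decide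

-- index entries of the table carry a single currency matching pvIndex
theorem pv_index_value : ∀ p ∈ pvTable, p.1 ∈ pvIndex.map Prod.fst →
    ∃ q ∈ pvIndex, q.1 = p.1 ∧ p.2 = [q.2] := by decide

-- main equivalence on the list side
theorem pv_main (s : List Char) : (match pvScanA s pvTable with
    | some cs => some cs
    | none =>
        match (PySem.Dict.mk pvTable).get? (PySem.List.slice s none (some 6)) with
        | some cs => some cs
        | none => none) =
    (let p := PySem.List.slice s none (some 6)
     if p ∈ pvPairs then
       some [String.ofList (PySem.List.slice p none (some 3)),
             String.ofList (PySem.List.slice p (some 3) (some 6))]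
     else if p ∈ pvMetals then some ["USD"]
     else pvTryIdx s [6, 5, 4]) := by
  rw [pv_slice_take s 6 (by norm_num)]
  by_cases hA : pvScanA s pvTable = none
  · -- no table key is a prefix of s: everything misses on both sides
    have hmiss : ∀ p ∈ pvTable, ¬ p.1 <+: s := (pvScanA_eq_none_iff s pvTable).mp hA
    have hTnone' : (PySem.Dict.mk pvTable).get? (s.take (6:Int).toNat) = none := by
      cases hg : (PySem.Dict.mk pvTable).get? (s.take (6:Int).toNat) with
      | none => rfl
      | some v => exact absurd (List.take_prefix _ _) (hmiss _ (pv_get?_mem hg))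
    have hP : ¬ s.take (6:Int).toNat ∈ pvPairs := by
      intro h
      obtain ⟨p, hp, _, hpre⟩ := pv_take6_pairs_table (s := s) (by simpa using h)
      exact hmiss p hp hpre
    have hM : ¬ s.take (6:Int).toNat ∈ pvMetals := by
      intro h
      obtain ⟨p, hp, _, hpre⟩ := pv_take6_metals_table (s := s) (by simpa using h)
      exact hmiss p hp hpre
    have hI : ∀ n : Int, 0 ≤ n →
        (PySem.Dict.mk pvIndex).get? (PySem.List.slice s none (some n)) = none := by
      intro n hn
      cases hg : (PySem.Dict.mk pvIndex).get? (PySem.List.slice s none (some n)) with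
      | none => rfl
      | some c =>
          obtain ⟨p, hp, hpre, _⟩ := pv_idx_hit hg hn
          exact absurd hpre (hmiss p hp)
    simp only [hA, hTnone', if_neg hP, if_neg hM, pvTryIdx,
      hI 6 (by norm_num), hI 5 (by norm_num), hI 4 (by norm_num)]
  · -- some entry p matches
    obtain ⟨v, hv⟩ := Option.ne_none_iff_exists'.mp hA
    obtain ⟨p, hp, hpre, hval⟩ := pvScanA_eq_some s pvTable hv
    simp only [hv]
    rcases pv_table_classified p hp with hcls | hcls | hcls
    · -- pair: s.take 6 = p.1, first branch fires with the split value
      have h6 : s.take (6:Int).toNat = p.1 := by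
        have hl := pv_pairs_len p.1 hcls
        have ht := List.prefix_iff_eq_take.mp hpre
        rw [ht]; simp [hl]
      rw [h6, if_pos hcls, ← hval, pv_pairs_value p hp hcls]
    · -- metal
      have h6 : s.take (6:Int).toNat = p.1 := by
        have hl := pv_metals_len p.1 hcls
        have ht := List.prefix_iff_eq_take.mp hpre
        rw [ht]; simp [hl]
      have hP : ¬ s.take (6:Int).toNat ∈ pvPairs := by
        rw [h6]; intro h
        have hd : ∀ k ∈ pvPairs, k ∉ pvMetals := by decide
        exact hd _ h hcls
      rw [if_neg hP, h6, if_pos hcls, ← hval, pv_metals_value p hp hcls]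
    · -- index entry
      obtain ⟨q, hq, hqk, hqv⟩ := pv_index_value p hp hcls
      have hP : ¬ s.take (6:Int).toNat ∈ pvPairs := by
        intro h
        obtain ⟨r, hr, hrk, hrpre⟩ := pv_take6_pairs_table (s := s) (by simpa using h)
        have heq := pv_unique hr hp hrpre hpre
        have hmem : p.1 ∈ pvPairs := by
          rw [← heq, hrk]; simpa using h
        have hd : ∀ k ∈ pvIndex.map Prod.fst, k ∉ pvPairs := by decide
        exact hd _ hcls hmem
      have hM : ¬ s.take (6:Int).toNat ∈ pvMetals := by
        intro h
        obtain ⟨r, hr, hrk, hrpre⟩ := pv_take6_metals_table (s := s) (by simpa using h)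
        have heq := pv_unique hr hp hrpre hpre
        have : p.1 ∈ pvMetals := by
          rw [← heq, hrk]; simpa using h
        have hd : ∀ k ∈ pvIndex.map Prod.fst, k ∉ pvMetals := by decide
        exact hd _ hcls this
      rw [if_neg hP, if_neg hM]
      -- index probe: any hit equals v, and the probe at |q.1| hits
      have huniq : ∀ {n : Int} {c : String}, 0 ≤ n →
          (PySem.Dict.mk pvIndex).get? (PySem.List.slice s none (some n)) = some c →
          [c] = v := by
        intro n c hn hg
        obtain ⟨r, hr, hrpre, hrval⟩ := pv_idx_hit hg hn
        have := pv_unique hr hp hrpre hpre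
        rw [← hrval, this, hval]
      have hhit := pv_idx_at_length hq (hqk ▸ hpre)
      have hlen := pv_index_len q hq
      simp only [pvTryIdx]
      cases h6' : (PySem.Dict.mk pvIndex).get? (PySem.List.slice s none (some 6)) with
      | some c => simp [huniq (by norm_num) h6']
      | none =>
        cases h5 : (PySem.Dict.mk pvIndex).get? (PySem.List.slice s none (some 5)) with
        | some c => simp [huniq (by norm_num) h5]
        | none =>
          cases h4 : (PySem.Dict.mk pvIndex).get? (PySem.List.slice s none (some 4)) with
          | some c => simp [huniq (by norm_num) h4]
          | none =>
              exfalso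
              rcases hlen with h | h | h <;>
                rw [h] at hhit <;>
                first
                  | exact absurd hhit (by rw [show ((4:Nat):Int) = (4:Int) by norm_num, h4]; simp)
                  | exact absurd hhit (by rw [show ((5:Nat):Int) = (5:Int) by norm_num, h5]; simp)
                  | exact absurd hhit (by rw [show ((6:Nat):Int) = (6:Int) by norm_num, h6']; simp)

-- ===== VERDICT (by name: the statement is the Claim_ definition above) =====
theorem resolve_currencies_py_spec : Claim_equal_resolve_currencies_py := by
  intro symbol _
  unfold Spec_resolve_currencies_py resolve_currencies_py resolve_currencies_py_alt
  exact pv_main (PySem.Chars.upper symbol.toList)
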